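-- pv_equiv track=rewrite | github.com/jodal/biip | src/biip/gs1/checksums.py | numeric_check_digit
-- ===== SOURCE A (Python) =====
-- import itertools
--
-- def numeric_check_digit(value: str) -> int:
--     """Get GS1 check digit for numeric string.
--
--     Args:
--         value: The numeric string to calculate the check digit for.
--
--     Returns:
--         The check digit.
--
--     Raises:
--         ValueError: If the value isn't numeric.
--
--     References:
--         GS1 General Specification, section 7.9
--
--     Example:
--         >>> from biip.gs1.checksums import numeric_check_digit
--         >>> numeric_check_digit("950110153100")  # GTIN-13
--         0
--         >>> numeric_check_digit("9501234")  # GTIN-8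
--         6
--     """
--     if not value.isnumeric():
--         raise ValueError(f"Expected numeric value, got {value!r}.")
--
--     digits = list(map(int, list(value)))
--     reversed_digits = reversed(digits)
--
--     weighted_sum = 0
--     for digit, weight in zip(reversed_digits, itertools.cycle([3, 1])):
--         weighted_sum += digit * weight
--
--     return (10 - weighted_sum % 10) % 10
-- ===== SOURCE B (Python) =====
-- def numeric_check_digit(value: str) -> int:
--     if not value.isnumeric():
--         raise ValueError(f"Expected numeric value, got {value!r}.")
--     sum3 = sum(int(c) for c in value[-1::-2])
--     sum1 = sum(int(c) for c in value[-2::-2])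
--     return (10 - (3 * sum3 + sum1) % 10) % 10
-- ===== Notes on version B (the rewrite author's own statement) =====
-- stated objective: idiomatic
-- what changed: Replaces the reversed-zip-with-itertools.cycle accumulation loop by two extended-slice sums from the right (weight-3 positions and weight-1 positions), combined as 3*sum3 + sum1.
import Mathlib
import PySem

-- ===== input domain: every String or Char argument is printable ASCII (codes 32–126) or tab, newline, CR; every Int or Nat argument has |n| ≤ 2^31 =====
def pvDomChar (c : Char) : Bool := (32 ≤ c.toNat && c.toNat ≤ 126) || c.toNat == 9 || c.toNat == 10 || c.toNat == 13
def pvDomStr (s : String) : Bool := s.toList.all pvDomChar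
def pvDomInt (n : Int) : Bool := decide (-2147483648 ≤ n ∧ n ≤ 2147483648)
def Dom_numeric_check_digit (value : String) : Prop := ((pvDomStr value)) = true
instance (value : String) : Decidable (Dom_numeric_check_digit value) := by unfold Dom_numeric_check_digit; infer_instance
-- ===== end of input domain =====

-- B replaces A's reversed-zip-with-cycle([3,1]) loop by two slice sums from the right (weight-3 and weight-1 positions); same cost, more idiomatic.

-- int(c) for a single digit character (Pre_ guarantees every character is an ASCII digit)
def charInt (c : Char) : Int := (c.toNat : Int) - 48

-- ===== PORT A =====
-- the 'for digit, weight in zip(reversed_digits, itertools.cycle([3, 1]))' loop: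
-- the Bool flag is the cycle state (true = next weight is 3)
def wsumA : List Int → Bool → Int → Int
  | [], _, acc => acc
  | d :: rest, b, acc => wsumA rest (!b) (acc + d * (if b then 3 else 1))

def numeric_check_digit (value : String) : Int :=
  -- 'if not value.isnumeric(): raise ValueError(...)' — on the ASCII domain isnumeric = nonempty ∧ all digits;
  -- the raising branch is excluded by Pre_ (the 0 is never claimed about)
  if ¬ (value.toList ≠ [] ∧ value.toList.all PySem.Chars.isdigit = true) then 0
  else
    let digits := value.toList.map charInt
    let reversed_digits := digits.reverse
    PySem.Int.mod (10 - PySem.Int.mod (wsumA reversed_digits true 0) 10) 10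

-- ===== PORT B =====
-- value[-1::-2] is every other element of the reversed character list starting at its head;
-- value[-2::-2] is every other element of the reversed list with its head dropped (exact for step -2 slices)
def everyOther : List Char → List Char
  | [] => []
  | [a] => [a]
  | a :: _ :: t => a :: everyOther t

-- sum(int(c) for c in l)
def sumInts : List Char → Int
  | [] => 0
  | c :: t => charInt c + sumInts t

def numeric_check_digit_alt (value : String) : Int :=
  if ¬ (value.toList ≠ [] ∧ value.toList.all PySem.Chars.isdigit = true) then 0
  else
    let r := value.toList.reverse
    let sum3 := sumInts (everyOther r)            -- value[-1::-2]
    let sum1 := sumInts (everyOther (r.drop 1))   -- value[-2::-2]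
    PySem.Int.mod (10 - PySem.Int.mod (3 * sum3 + sum1) 10) 10

-- ===== PRECONDITION & SPEC =====
-- Pre_ = exactly the inputs where the Python A returns (value.isnumeric() on the ASCII domain); elsewhere A raises ValueError
def Pre_numeric_check_digit (value : String) : Prop :=
  value.toList ≠ [] ∧ value.toList.all PySem.Chars.isdigit = true
instance (value : String) : Decidable (Pre_numeric_check_digit value) := by unfold Pre_numeric_check_digit; infer_instance
def pvWitness_numeric_check_digit : String := "9501234"

def Spec_numeric_check_digit (value : String) (out : Int) : Prop := out = numeric_check_digit_alt value
instance (value : String) (out : Int) : Decidable (Spec_numeric_check_digit value out) := by unfold Spec_numeric_check_digit; infer_instance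

-- ===== CLAIM (what is proved, stated in full; the proofs are below) =====
def Claim_equal_numeric_check_digit : Prop := ∀ (value : String), Dom_numeric_check_digit value → Pre_numeric_check_digit value → Spec_numeric_check_digit value (numeric_check_digit value)

-- ===== LEMMAS AND PROOFS =====

lemma everyOther_cons (a : Char) (t : List Char) :
    everyOther (a :: t) = a :: everyOther (t.drop 1) := by
  cases t <;> simp [everyOther]

lemma wsumA_key (l : List Char) : ∀ acc : Int,
    (wsumA (l.map charInt) true acc
      = acc + 3 * sumInts (everyOther l) + sumInts (everyOther (l.drop 1)))
    ∧ (wsumA (l.map charInt) false acc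
      = acc + sumInts (everyOther l) + 3 * sumInts (everyOther (l.drop 1))) := by
  induction l with
  | nil => intro acc; simp [wsumA, everyOther, sumInts]
  | cons a t ih =>
    intro acc
    have ih1 := (ih (acc + charInt a * 3)).2
    have ih2 := (ih (acc + charInt a * 1)).1
    constructor
    · simp only [List.map_cons, wsumA, Bool.not_true, if_pos, everyOther_cons, sumInts, List.drop_succ_cons, List.drop_zero]
      rw [ih1]; ring
    · simp only [List.map_cons, wsumA, Bool.not_false, everyOther_cons, sumInts, if_neg Bool.false_ne_true, List.drop_succ_cons, List.drop_zero]
      rw [ih2]; ring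

-- ===== VERDICT (by name: the statement is the Claim_ definition above) =====
theorem numeric_check_digit_spec : Claim_equal_numeric_check_digit := by
  intro value _ hpre
  unfold Pre_numeric_check_digit at hpre
  unfold Spec_numeric_check_digit numeric_check_digit numeric_check_digit_alt
  rw [if_neg (not_not_intro hpre), if_neg (not_not_intro hpre)]
  show PySem.Int.mod (10 - PySem.Int.mod (wsumA ((value.toList.map charInt).reverse) true 0) 10) 10
      = PySem.Int.mod (10 - PySem.Int.mod
          (3 * sumInts (everyOther value.toList.reverse)
            + sumInts (everyOther (value.toList.reverse.drop 1))) 10) 10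
  have h := (wsumA_key value.toList.reverse 0).1
  simp only [zero_add] at h
  rw [← List.map_reverse, h]
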